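-- pv_equiv track=rewrite | github.com/gaspernovak20/P1 | DN/DN03/naloga1.py | izboljsave
-- ===== SOURCE A (Python) =====
-- def pretvori_vrstico(vrstica):
--     seznam_parov = []
--     zacetek_ovire = 0
--     konec_ovire = 0
--
--     znana_ovira = False
--     for i, c in enumerate(vrstica):
--
--         if c == "#" and not znana_ovira:
--             zacetek_ovire = i+1
--             znana_ovira = True
--
--         if c == "." and znana_ovira:
--             konec_ovire = i
--             seznam_parov.append((zacetek_ovire, konec_ovire))
--             znana_ovira = False
--
--         if znana_ovira and i == len(vrstica)-1:
--             konec_ovire = i+1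
--             seznam_parov.append((zacetek_ovire, konec_ovire))
--
--     return seznam_parov
--
-- def pretvori_zemljevid(vrstice):
--     seznam_ovir = []
--     for i, vrstica in enumerate(vrstice):
--         for ovira_kordinate in pretvori_vrstico(vrstica):
--             seznam_ovir.append(ovira_kordinate+(i+1,))
--
--     return seznam_ovir
--
-- def izboljsave(prej, potem):
--     ovire_prej = pretvori_zemljevid(prej)
--     ovire_potem = pretvori_zemljevid(potem)
--
--     nove_ovire = []
--
--     for ovira in ovire_potem:
--         if ovira in ovire_prej:
--             continue
--         else:
--             nove_ovire.append(ovira)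
--
--     return nove_ovire
-- ===== SOURCE B (Python) =====
-- def izboljsave(prej, potem):
--     def ovire(vrstice):
--         rez = []
--         for r, vrstica in enumerate(vrstice, 1):
--             o = 0
--             for seg in vrstica.split('.'):
--                 j = seg.find('#')
--                 if j != -1:
--                     rez.append((o + j + 1, o + len(seg), r))
--                 o += len(seg) + 1
--         return rez
--     stare = set(ovire(prej))
--     return [ov for ov in ovire(potem) if ov not in stare]
-- ===== Notes on version B (the rewrite author's own statement) =====
-- stated objective: alternative
-- what changed: The per-character state machine with znana_ovira/zacetek flags is replaced by splitting each line on '.' and locating the first '#' of each segment, and the quadratic order-preserving difference over ovire_prej is replaced by a set-backed filter.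
import Mathlib
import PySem

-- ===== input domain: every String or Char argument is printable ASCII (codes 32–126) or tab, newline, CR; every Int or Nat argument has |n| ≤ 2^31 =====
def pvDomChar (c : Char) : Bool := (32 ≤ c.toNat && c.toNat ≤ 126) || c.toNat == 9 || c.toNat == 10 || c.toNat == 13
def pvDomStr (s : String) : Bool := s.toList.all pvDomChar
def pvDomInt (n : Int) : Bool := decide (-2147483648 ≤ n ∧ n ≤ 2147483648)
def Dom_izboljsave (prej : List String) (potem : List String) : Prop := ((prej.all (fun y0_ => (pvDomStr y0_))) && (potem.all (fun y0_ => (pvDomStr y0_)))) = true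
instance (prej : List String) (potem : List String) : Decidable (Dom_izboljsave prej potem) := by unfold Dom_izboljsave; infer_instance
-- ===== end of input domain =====

-- B replaces A's hand-rolled per-character state machine by a split-on-'.'-then-find-'#' segment
-- scan and a set-based difference (objective: alternative; the return value is proved identical).


-- ===== PORT A =====
-- loop body of pretvori_vrstico: the three ifs on (seznam_parov, zacetek_ovire, konec_ovire, znana_ovira)
def stepVrstica (n : Int) (st : List (Int × Int) × Int × Int × Bool) (ic : Int × Char) :
    List (Int × Int) × Int × Int × Bool :=
  match st, ic with
  | (sez, zac, kon, zn), (i, c) =>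
    let p := if c = '#' ∧ zn = false then (i + 1, true) else (zac, zn)
    let q := if c = '.' ∧ p.2 = true then (sez ++ [(p.1, i)], i, false) else (sez, kon, p.2)
    if q.2.2 = true ∧ i = n - 1 then (q.1 ++ [(p.1, i + 1)], p.1, i + 1, q.2.2)
    else (q.1, p.1, q.2.1, q.2.2)

def pretvoriVrstico (vrstica : String) : List (Int × Int) :=
  ((PySem.List.enumerate vrstica.toList 0).foldl
      (stepVrstica (PySem.Str.len vrstica)) ([], 0, 0, false)).1

def pretvoriZemljevid (vrstice : List String) : List (Int × Int × Int) :=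
  (PySem.List.enumerate vrstice 0).foldl
    (fun acc iv => (pretvoriVrstico iv.2).foldl (fun a ov => a ++ [(ov.1, ov.2, iv.1 + 1)]) acc) []

def izboljsave (prej : List String) (potem : List String) : List (Int × Int × Int) :=
  let ovirePrej := pretvoriZemljevid prej
  let ovirePotem := pretvoriZemljevid potem
  ovirePotem.foldl (fun nove ovira => if ovira ∈ ovirePrej then nove else nove ++ [ovira]) []

-- ===== PORT B =====
-- loop body of Source B's inner segment loop: (rez, o) updated per segment of vrstica.split('.')
def stepSeg (r : Int) (st : List (Int × Int × Int) × Int) (seg : List Char) :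
    List (Int × Int × Int) × Int :=
  let j := PySem.Chars.find seg ['#']
  (if j ≠ -1 then st.1 ++ [(st.2 + j + 1, st.2 + (seg.length : Int), r)] else st.1,
   st.2 + (seg.length : Int) + 1)

def ovireAlt (vrstice : List String) : List (Int × Int × Int) :=
  (PySem.List.enumerate vrstice 1).foldl
    (fun rez rv => ((PySem.Chars.splitOn rv.2.toList ['.']).foldl (stepSeg rv.1) (rez, 0)).1) []

def izboljsave_alt (prej : List String) (potem : List String) : List (Int × Int × Int) :=
  let stare := PySem.Set.ofList (ovireAlt prej)
  (ovireAlt potem).filter (fun ov => !(PySem.Set.contains stare ov))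

-- ===== PRECONDITION & SPEC =====
def Spec_izboljsave (prej : List String) (potem : List String) (out : List (Int × Int × Int)) : Prop := out = izboljsave_alt prej potem
instance (prej : List String) (potem : List String) (out : List (Int × Int × Int)) : Decidable (Spec_izboljsave prej potem out) := by unfold Spec_izboljsave; infer_instance

-- ===== CLAIM (what is proved, stated in full; the proofs are below) =====
def Claim_equal_izboljsave : Prop := ∀ (prej : List String) (potem : List String), Dom_izboljsave prej potem → Spec_izboljsave prej potem (izboljsave prej potem)

-- ===== LEMMAS AND PROOFS =====

-- A's per-line scan, written as structural recursion (emissions in order; konec_ovire dropped: it is never read)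
def scanA : List Char → Int → Int → Bool → List (Int × Int)
  | [], _, _, _ => []
  | c :: rest, i, zac, zn =>
    let p := if c = '#' ∧ zn = false then (i + 1, true) else (zac, zn)
    let q := if c = '.' ∧ p.2 = true then ([(p.1, i)], false) else ([], p.2)
    let em := if q.2 = true ∧ rest = [] then q.1 ++ [(p.1, i + 1)] else q.1
    em ++ scanA rest (i + 1) p.1 q.2

-- structural counterpart of Python's str.split('.')
def mySplit : List Char → List (List Char)
  | [] => [[]]
  | c :: rest =>
    if c = '.' then [] :: mySplit rest
    else match mySplit rest with
      | [] => [[c]]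
      | s :: ss => (c :: s) :: ss

def consH (p : List Char) : List (List Char) → List (List Char)
  | [] => [p]
  | s :: ss => (p ++ s) :: ss

-- B's per-line emissions (as pairs; the row index is mapped on afterwards)
def segsB : List (List Char) → Int → List (Int × Int)
  | [], _ => []
  | seg :: rest, o =>
    (if PySem.Chars.find seg ['#'] ≠ -1 then
        [(o + PySem.Chars.find seg ['#'] + 1, o + (seg.length : Int))] else [])
      ++ segsB rest (o + (seg.length : Int) + 1)

-- A's scan while inside an obstacle that started earlier
def finishA : List Char → Int → Int → List (Int × Int)
  | [], _, _ => []
  | c :: rest, i, z =>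
    if c = '.' then (z, i) :: segsB (mySplit rest) (i + 1)
    else if rest = [] then [(z, i + 1)] else finishA rest (i + 1) z

lemma segsB_cons_pos (seg : List Char) (t : List (List Char)) (o : Int)
    (h : PySem.Chars.find seg ['#'] ≠ -1) :
    segsB (seg :: t) o
      = (o + PySem.Chars.find seg ['#'] + 1, o + (seg.length : Int))
          :: segsB t (o + (seg.length : Int) + 1) := by
  simp only [segsB]; rw [if_pos h]; simp

lemma segsB_cons_neg (seg : List Char) (t : List (List Char)) (o : Int)
    (h : PySem.Chars.find seg ['#'] = -1) :
    segsB (seg :: t) o = segsB t (o + (seg.length : Int) + 1) := by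
  simp only [segsB]; rw [if_neg (by simp [h])]; simp

lemma mySplit_ne_nil (cs : List Char) : mySplit cs ≠ [] := by
  cases cs with
  | nil => simp [mySplit]
  | cons c rest =>
    simp only [mySplit]
    split_ifs
    · simp
    · cases h : mySplit rest <;> simp

lemma consH_nil_of_ne (l : List (List Char)) (h : l ≠ []) : consH [] l = l := by
  cases l with
  | nil => exact absurd rfl h
  | cons s ss => simp [consH]

lemma consH_consH (p q : List Char) (l : List (List Char)) :
    consH p (consH q l) = consH (p ++ q) l := by
  cases l <;> simp [consH]

lemma go_split (fuel : Nat) : ∀ (cs cur : List Char) (acc : List (List Char)),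
    cs.length ≤ fuel →
    PySem.Chars.splitOn.go ['.'] fuel cs cur acc = acc.reverse ++ consH cur.reverse (mySplit cs) := by
  induction fuel with
  | zero =>
    intro cs cur acc h
    have : cs = [] := List.length_eq_zero_iff.mp (Nat.le_zero.mp h)
    subst this
    simp [PySem.Chars.splitOn.go, mySplit, consH]
  | succ fuel ih =>
    intro cs cur acc h
    cases cs with
    | nil => simp [PySem.Chars.splitOn.go, mySplit, consH]
    | cons c rest =>
      by_cases hc : c = '.'
      · subst hc
        rw [show PySem.Chars.splitOn.go ['.'] (fuel+1) ('.'::rest) cur acc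
              = PySem.Chars.splitOn.go ['.'] fuel rest [] (cur.reverse :: acc) by
            simp [PySem.Chars.splitOn.go, List.isPrefixOf]]
        rw [ih rest [] (cur.reverse :: acc) (by simpa using Nat.le_of_succ_le_succ (by simpa using h))]
        rw [List.reverse_nil, consH_nil_of_ne _ (mySplit_ne_nil rest)]
        simp [mySplit, consH]
      · rw [show PySem.Chars.splitOn.go ['.'] (fuel+1) (c::rest) cur acc
              = PySem.Chars.splitOn.go ['.'] fuel rest (c :: cur) acc by
            simp [PySem.Chars.splitOn.go, List.isPrefixOf, Ne.symm hc]]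
        rw [ih rest (c :: cur) acc (by simpa using Nat.le_of_succ_le_succ (by simpa using h))]
        have : mySplit (c :: rest) = consH [c] (mySplit rest) := by
          simp only [mySplit, if_neg hc]
          cases h' : mySplit rest <;> simp [consH]
        rw [this, consH_consH]
        simp

lemma splitOn_eq_mySplit (cs : List Char) : PySem.Chars.splitOn cs ['.'] = mySplit cs := by
  show PySem.Chars.splitOn.go ['.'] (cs.length + 1) cs [] [] = mySplit cs
  rw [go_split (cs.length + 1) cs [] [] (Nat.le_succ _)]
  simpa using consH_nil_of_ne _ (mySplit_ne_nil cs)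

-- find.go for the one-character needle '#': offset shift and nonnegativity, jointly
lemma go_hash (s : List Char) : ∀ k : Nat,
    (PySem.Chars.find.go ['#'] s k
        = if PySem.Chars.find.go ['#'] s 0 = -1 then -1 else PySem.Chars.find.go ['#'] s 0 + k)
    ∧ (PySem.Chars.find.go ['#'] s 0 = -1 ∨ 0 ≤ PySem.Chars.find.go ['#'] s 0) := by
  induction s with
  | nil => intro k; simp [PySem.Chars.find.go]
  | cons c s ih =>
    intro k
    by_cases hc : c = '#'
    · subst hc
      have h0 : ∀ m : Nat, PySem.Chars.find.go ['#'] ('#'::s) m = (m : Int) := by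
        intro m; simp [PySem.Chars.find.go, List.isPrefixOf]
      rw [h0, h0]
      refine ⟨by simp, Or.inr (by simp)⟩
    · have hstep : ∀ m : Nat, PySem.Chars.find.go ['#'] (c::s) m = PySem.Chars.find.go ['#'] s (m+1) := by
        intro m; simp [PySem.Chars.find.go, List.isPrefixOf, Ne.symm hc]
      rw [hstep, hstep]
      rw [(ih (k+1)).1, (ih 1).1]
      by_cases hz : PySem.Chars.find.go ['#'] s 0 = -1
      · simp [hz]
      · rcases (ih 0).2 with h | h
        · exact absurd h hz
        · refine ⟨?_, Or.inr ?_⟩ <;> simp only [if_neg hz] <;> push_cast <;> omega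

lemma find_nonneg_or (s : List Char) :
    PySem.Chars.find s ['#'] = -1 ∨ 0 ≤ PySem.Chars.find s ['#'] := (go_hash s 0).2

lemma find_cons_hash_self (s : List Char) : PySem.Chars.find ('#' :: s) ['#'] = 0 := by
  simp [PySem.Chars.find, PySem.Chars.find.go, List.isPrefixOf]

lemma find_cons_hash_ne (c : Char) (s : List Char) (hc : c ≠ '#') :
    PySem.Chars.find (c :: s) ['#']
      = if PySem.Chars.find s ['#'] = -1 then -1 else PySem.Chars.find s ['#'] + 1 := by
  show PySem.Chars.find.go ['#'] (c :: s) 0 = _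
  rw [show PySem.Chars.find.go ['#'] (c::s) 0 = PySem.Chars.find.go ['#'] s 1 by
    simp [PySem.Chars.find.go, List.isPrefixOf, Ne.symm hc]]
  rw [(go_hash s 1).1]
  rfl

lemma find_nil_hash : PySem.Chars.find [] ['#'] = -1 := by decide

-- the fold of A's loop body is scanA, as long as n is the true total length
lemma foldA (cs : List Char) : ∀ (n i zac kon : Int) (zn : Bool) (sez : List (Int × Int)),
    n = i + cs.length →
    ((PySem.List.enumerate cs i).foldl (stepVrstica n) (sez, zac, kon, zn)).1
      = sez ++ scanA cs i zac zn := by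
  induction cs with
  | nil => intro n i zac kon zn sez _; simp [PySem.List.enumerate_nil, scanA]
  | cons c rest ih =>
    intro n i zac kon zn sez h
    rw [PySem.List.enumerate_cons, List.foldl_cons]
    have hiff : (i = n - 1) ↔ (rest = []) := by
      constructor
      · intro h1
        have : (rest.length : Int) = 0 := by simp at h; omega
        exact List.length_eq_zero_iff.mp (by exact_mod_cast this)
      · intro h1; subst h1; simp at h; omega
    simp only [stepVrstica, scanA, hiff]
    split_ifs <;>
      (rw [ih n (i+1) _ _ _ _ (by simp at h ⊢; omega)]) <;> simp

-- B's inner segment fold is segsB with the row index mapped on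
lemma foldSeg : ∀ (segs : List (List Char)) (rez : List (Int × Int × Int)) (o r : Int),
    (segs.foldl (stepSeg r) (rez, o)).1
      = rez ++ (segsB segs o).map (fun p => (p.1, p.2, r)) := by
  intro segs
  induction segs with
  | nil => intro rez o r; simp [segsB]
  | cons seg rest ih =>
    intro rez o r
    rw [List.foldl_cons]
    simp only [stepSeg, segsB]
    split_ifs with hf
    · rw [ih]; simp
    · rw [ih]; simp

-- characterization of finishA through mySplit's head segment
lemma finishA_eq : ∀ (cs : List Char) (i z : Int), cs ≠ [] →
    ∀ h t, mySplit cs = h :: t →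
    finishA cs i z = (z, i + (h.length : Int)) :: segsB t (i + (h.length : Int) + 1) := by
  intro cs
  induction cs with
  | nil => intro i z hne; exact absurd rfl hne
  | cons c rest ih =>
    intro i z _ h t hsplit
    by_cases hd : c = '.'
    · subst hd
      simp only [mySplit] at hsplit
      obtain ⟨rfl, rfl⟩ := hsplit
      simp [finishA]
    · by_cases hrne : rest = []
      · subst hrne
        simp only [mySplit, if_neg hd, List.cons.injEq] at hsplit
        obtain ⟨rfl, rfl⟩ := hsplit
        simp [finishA, hd, segsB]
      · obtain ⟨h', t', hsplit'⟩ : ∃ h' t', mySplit rest = h' :: t' := by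
          cases hx : mySplit rest with
          | nil => exact absurd hx (mySplit_ne_nil rest)
          | cons a b => exact ⟨a, b, rfl⟩
        have hms : mySplit (c :: rest) = (c :: h') :: t' := by
          simp only [mySplit, if_neg hd, hsplit']
        rw [hms, List.cons.injEq] at hsplit
        obtain ⟨rfl, rfl⟩ := hsplit
        rw [show finishA (c :: rest) i z = finishA rest (i+1) z by
          simp [finishA, hd, hrne]]
        rw [ih (i+1) z hrne h' t' hsplit']
        simp only [List.length_cons]
        push_cast
        ring_nf

-- core: A's scan equals B's segment emissions (both states, jointly, by induction on the line)
lemma scan_split (cs : List Char) :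
    (∀ i zac : Int, scanA cs i zac false = segsB (mySplit cs) i)
    ∧ (∀ i z : Int, scanA cs i z true = finishA cs i z) := by
  induction cs with
  | nil => exact ⟨fun i zac => by simp [scanA, mySplit, segsB, find_nil_hash],
                  fun i z => by simp [scanA, finishA]⟩
  | cons c rest ih =>
    obtain ⟨h', t', hsp⟩ : ∃ h' t', mySplit rest = h' :: t' := by
      cases hx : mySplit rest with
      | nil => exact absurd hx (mySplit_ne_nil rest)
      | cons a b => exact ⟨a, b, rfl⟩
    constructor
    · intro i zac
      by_cases hd : c = '.'
      · subst hd
        rw [show scanA ('.' :: rest) i zac false = scanA rest (i+1) zac false by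
          simp [scanA]]
        rw [ih.1, show mySplit ('.' :: rest) = [] :: mySplit rest by simp [mySplit]]
        simp [segsB, find_nil_hash]
      · by_cases hh : c = '#'
        · subst hh
          have hms : mySplit ('#' :: rest) = ('#' :: h') :: t' := by
            simp [mySplit, hsp]
          by_cases hrne : rest = []
          · subst hrne
            simp only [mySplit, List.cons.injEq] at hsp
            obtain ⟨rfl, rfl⟩ := hsp
            rw [hms]
            simp [scanA, segsB, find_cons_hash_self]
          · rw [show scanA ('#' :: rest) i zac false = scanA rest (i+1) (i+1) true by
              simp [scanA, hrne]]
            rw [ih.2, hms]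
            rw [finishA_eq rest (i+1) (i+1) hrne h' t' hsp]
            rw [segsB_cons_pos _ _ _ (by rw [find_cons_hash_self]; norm_num)]
            rw [find_cons_hash_self]
            simp only [List.length_cons]
            push_cast
            ring_nf
        · have hms : mySplit (c :: rest) = (c :: h') :: t' := by
            simp only [mySplit, if_neg hd, hsp]
          rw [show scanA (c :: rest) i zac false = scanA rest (i+1) zac false by
            simp [scanA, hd, hh]]
          rw [ih.1, hms, hsp]
          have hfc := find_cons_hash_ne c h' hh
          rcases find_nonneg_or h' with hf | hf
          · rw [segsB_cons_neg _ _ _ hf, segsB_cons_neg _ _ _ (by rw [hfc, if_pos hf])]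
            simp only [List.length_cons]
            push_cast
            ring_nf
          · have hfne : PySem.Chars.find h' ['#'] ≠ -1 := by omega
            have hfne2 : PySem.Chars.find h' ['#'] + 1 ≠ -1 := by omega
            rw [segsB_cons_pos _ _ _ hfne, segsB_cons_pos _ _ _ (by rw [hfc, if_neg hfne]; exact hfne2)]
            rw [hfc, if_neg hfne]
            simp only [List.length_cons]
            push_cast
            ring_nf
    · intro i z
      by_cases hd : c = '.'
      · subst hd
        rw [show scanA ('.' :: rest) i z true = (z, i) :: scanA rest (i+1) z false by
          simp [scanA]]
        rw [ih.1]
        simp [finishA]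
      · by_cases hrne : rest = []
        · subst hrne
          simp [scanA, finishA, hd]
        · rw [show scanA (c :: rest) i z true = scanA rest (i+1) z true by
            simp [scanA, hd, hrne]]
          rw [ih.2]
          simp [finishA, hd, hrne]

-- per line: A's pretvori_vrstico = B's split-and-find emissions
lemma line_eq (v : String) :
    pretvoriVrstico v = segsB (PySem.Chars.splitOn v.toList ['.']) 0 := by
  unfold pretvoriVrstico
  rw [foldA v.toList (PySem.Str.len v) 0 0 0 false [] (by simp [PySem.Str.len_eq])]
  rw [(scan_split v.toList).1 0 0, splitOn_eq_mySplit]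
  simp

-- whole map: A's pretvori_zemljevid = B's ovireAlt (rows aligned: enumerate at 0 (+1) vs at 1)
lemma zem_eq : ∀ (vs : List String) (i : Int) (acc : List (Int × Int × Int)),
    (PySem.List.enumerate vs i).foldl
      (fun acc iv => (pretvoriVrstico iv.2).foldl (fun a ov => a ++ [(ov.1, ov.2, iv.1 + 1)]) acc) acc
    = (PySem.List.enumerate vs (i+1)).foldl
      (fun rez rv => ((PySem.Chars.splitOn rv.2.toList ['.']).foldl (stepSeg rv.1) (rez, 0)).1) acc := by
  intro vs
  induction vs with
  | nil => intro i acc; simp [PySem.List.enumerate_nil]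
  | cons v vs ih =>
    intro i acc
    rw [PySem.List.enumerate_cons, PySem.List.enumerate_cons, List.foldl_cons, List.foldl_cons]
    rw [show ((i, v) : Int × String).1 = i from rfl, show ((i, v) : Int × String).2 = v from rfl]
    rw [PySem.List.foldl_append_singleton_eq_map (fun ov : Int × Int => (ov.1, ov.2, i + 1))]
    rw [foldSeg, line_eq]
    exact ih (i+1) _

lemma zemljevid_eq (vs : List String) : pretvoriZemljevid vs = ovireAlt vs := by
  unfold pretvoriZemljevid ovireAlt
  simpa using zem_eq vs 0 []

lemma fold_filter (l O1 : List (Int × Int × Int)) :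
    l.foldl (fun nove ovira => if ovira ∈ O1 then nove else nove ++ [ovira]) []
      = l.filter (fun ov => !(PySem.Set.contains (PySem.Set.ofList O1) ov)) := by
  have hfun : (fun (nove : List (Int × Int × Int)) ovira =>
      if ovira ∈ O1 then nove else nove ++ [ovira])
      = (fun acc x => if (!(PySem.Set.contains (PySem.Set.ofList O1) x)) = true
          then acc ++ [id x] else acc) := by
    funext acc x
    by_cases hx : x ∈ O1
    · simp [hx, PySem.Set.contains, PySem.Set.mem_ofList]
    · simp [hx, PySem.Set.contains, PySem.Set.mem_ofList]
  rw [hfun, PySem.List.foldl_append_if]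
  simp

-- ===== VERDICT (by name: the statement is the Claim_ definition above) =====
theorem izboljsave_spec : Claim_equal_izboljsave := by
  intro prej potem _
  unfold Spec_izboljsave izboljsave izboljsave_alt
  rw [zemljevid_eq, zemljevid_eq]
  exact fold_filter _ _
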